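-- pv_equiv track=rewrite | github.com/swth1991/ApplyCrypto | src/generator/analysis_report_generator.py | _calculate_llm_metrics
-- ===== SOURCE A (Python) =====
-- TRANSLATION_FIELDS = {
--     'atype': ['Reason', 'Insertion Point', 'Sql Summary'],
--     'btype': ['Sql Summary']
-- }
--
-- def _calculate_llm_metrics(batch_items, modification_type):
--     """배치 항목의 LLM 호출 메트릭을 계산합니다.
--
--     Args:
--         batch_items: 배치 프롬프트에 포함될 항목 리스트
--         modification_type: 'atype' 또는 'btype'
--
--     Returns:
--         (총_길이, 예상_토큰, 필드별_길이_dict) 튜플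
--     """
--     if not batch_items:
--         return 0, 0, {}
--
--     fields = TRANSLATION_FIELDS.get(modification_type, [])
--     total_length = 0
--     field_lengths = {field: 0 for field in fields}
--
--     for item in batch_items:
--         for field in fields:
--             text = item.get(field, '') or ''
--             length = len(str(text))
--             total_length += length
--             field_lengths[field] += length
--
--     # 토큰 추정 (평균 4문자 = 1토큰)
--     estimated_tokens = total_length // 4
--
--     return total_length, estimated_tokens, field_lengths
-- ===== SOURCE B (Python) =====
-- TRANSLATION_FIELDS = {
--     'atype': ['Reason', 'Insertion Point', 'Sql Summary'],
--     'btype': ['Sql Summary']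
-- }
--
-- def _calculate_llm_metrics(batch_items, modification_type):
--     if not batch_items:
--         return 0, 0, {}
--     fields = TRANSLATION_FIELDS.get(modification_type, [])
--
--     def row(item):
--         # per-item vector of field text lengths, aligned with `fields`
--         return [len(str(item.get(f, '') or '')) for f in fields]
--
--     def col_sums(items):
--         # divide and conquer: merge per-field length vectors elementwise
--         if len(items) == 1:
--             return row(items[0])
--         mid = len(items) // 2
--         left = col_sums(items[:mid])
--         right = col_sums(items[mid:])
--         return [a + b for a, b in zip(left, right)]
--
--     vec = col_sums(batch_items)
--     total_length = sum(vec)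
--     return total_length, total_length // 4, dict(zip(fields, vec))
-- ===== Notes on version B (the rewrite author's own statement) =====
-- stated objective: alternative
-- what changed: B replaces A's item-outer accumulator loop mutating a dict by a divide-and-conquer pass: each item yields a vector of field lengths, halves of the batch are recursively merged by elementwise vector addition, and the total and the dict are derived from the final vector once at the end.
import Mathlib
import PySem

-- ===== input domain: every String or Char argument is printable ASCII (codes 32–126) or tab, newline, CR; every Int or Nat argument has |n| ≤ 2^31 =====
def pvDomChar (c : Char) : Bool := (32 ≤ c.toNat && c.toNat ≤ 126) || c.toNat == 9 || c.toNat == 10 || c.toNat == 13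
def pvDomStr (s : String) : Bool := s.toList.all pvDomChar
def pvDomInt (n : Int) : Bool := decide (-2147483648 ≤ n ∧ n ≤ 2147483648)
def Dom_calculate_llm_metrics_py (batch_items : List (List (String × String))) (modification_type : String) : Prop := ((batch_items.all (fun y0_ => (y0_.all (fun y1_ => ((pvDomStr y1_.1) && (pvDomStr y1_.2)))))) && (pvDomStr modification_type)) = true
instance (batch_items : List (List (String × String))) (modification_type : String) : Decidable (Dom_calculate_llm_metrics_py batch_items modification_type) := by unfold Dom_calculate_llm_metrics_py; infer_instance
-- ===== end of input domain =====

-- B replaces A's item-outer dict-mutating accumulator loop by a divide-and-conquer merge of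
-- per-item length vectors, deriving the total and the dict from the final vector (alternative; same cost).

-- ===== PORT A =====
-- TRANSLATION_FIELDS.get(modification_type, []) on the module-level literal dict
def pvFields (mt : String) : List String :=
  if mt == "atype" then ["Reason", "Insertion Point", "Sql Summary"]
  else if mt == "btype" then ["Sql Summary"]
  else []

-- item.get(field, '') or '' ; values are str so str(text) is the identity
def pvText (item : List (String × String)) (f : String) : String :=
  let text := (List.lookup f item).getD ""
  if text == "" then "" else text

-- field_lengths[field] += length  (key always present: the dict's keys are exactly `fields`)
def pvBump (fl : List (String × Int)) (k : String) (n : Int) : List (String × Int) :=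
  match fl with
  | [] => []
  | (k', v) :: rest => if k' == k then (k', v + n) :: rest else (k', v) :: pvBump rest k n

def calculate_llm_metrics_py (batch_items : List (List (String × String))) (modification_type : String) : Int × Int × (List (String × Int)) :=
  if batch_items.isEmpty then (0, 0, [])
  else
    let fields := pvFields modification_type
    let st := batch_items.foldl (fun st item =>
        fields.foldl (fun st f =>
            -- length = len(str(text)); used for both accumulators
            (st.1 + PySem.Str.len (pvText item f), pvBump st.2 f (PySem.Str.len (pvText item f)))) st)
      (0, fields.map (fun f => (f, (0 : Int))))
    (st.1, PySem.Int.floordiv st.1 4, st.2)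

-- ===== PORT B =====
-- row(item) = [len(str(item.get(f, '') or '')) for f in fields]
def pvRow (fields : List String) (item : List (String × String)) : List Int :=
  fields.map (fun f => (PySem.Str.len (pvText item f) : Int))

-- col_sums(items): divide and conquer, merging vectors elementwise.
-- (B is only ever called on nonempty `items`; the [] branch is a totality guard.)
def pvColSums (fields : List String) (items : List (List (String × String))) : List Int :=
  if _h : items.length ≤ 1 then
    match items with
    | [] => fields.map (fun _ => (0 : Int))      -- unreachable totality guard
    | x :: _ => pvRow fields x                   -- len(items) == 1: row(items[0])
  else
    let mid := items.length / 2
    (pvColSums fields (items.take mid)).zipWith (· + ·) (pvColSums fields (items.drop mid))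
termination_by items.length
decreasing_by
  · simp [List.length_take]; omega
  · simp [List.length_drop]; omega

def calculate_llm_metrics_py_alt (batch_items : List (List (String × String))) (modification_type : String) : Int × Int × (List (String × Int)) :=
  if batch_items.isEmpty then (0, 0, [])
  else
    let fields := pvFields modification_type
    let vec := pvColSums fields batch_items
    let total_length := vec.sum
    (total_length, PySem.Int.floordiv total_length 4, fields.zip vec)

-- ===== PRECONDITION & SPEC =====
def Spec_calculate_llm_metrics_py (batch_items : List (List (String × String))) (modification_type : String) (out : Int × Int × (List (String × Int))) : Prop := out = calculate_llm_metrics_py_alt batch_items modification_type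
instance (batch_items : List (List (String × String))) (modification_type : String) (out : Int × Int × (List (String × Int))) : Decidable (Spec_calculate_llm_metrics_py batch_items modification_type out) := by unfold Spec_calculate_llm_metrics_py; infer_instance

-- ===== CLAIM (what is proved, stated in full; the proofs are below) =====
def Claim_equal_calculate_llm_metrics_py : Prop := ∀ (batch_items : List (List (String × String))) (modification_type : String), Dom_calculate_llm_metrics_py batch_items modification_type → Spec_calculate_llm_metrics_py batch_items modification_type (calculate_llm_metrics_py batch_items modification_type)

-- ===== LEMMAS AND PROOFS =====

-- a single column sum, the value pvColSums is characterised by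
def pvColSum (items : List (List (String × String))) (f : String) : Int :=
  (items.map (fun item => (PySem.Str.len (pvText item f) : Int))).sum

theorem colSum_cons (item : List (String × String)) (rest : List (List (String × String))) (f : String) :
    pvColSum (item :: rest) f = (PySem.Str.len (pvText item f) : Int) + pvColSum rest f := by
  simp [pvColSum]

theorem colSum_append (l1 l2 : List (List (String × String))) (f : String) :
    pvColSum (l1 ++ l2) f = pvColSum l1 f + pvColSum l2 f := by
  simp [pvColSum]

theorem zipWith_add_map {α : Type} (l : List α) (g h : α → Int) :
    (l.map g).zipWith (· + ·) (l.map h) = l.map (fun x => g x + h x) := by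
  induction l with
  | nil => rfl
  | cons a t ih => simp [ih]

-- the divide-and-conquer merge computes exactly the per-field column sums
theorem colSums_eq (fields : List String) (items : List (List (String × String))) :
    pvColSums fields items = fields.map (fun f => pvColSum items f) := by
  fun_induction pvColSums fields items with
  | case1 h => simp [pvColSum]
  | case2 x t h =>
    have ht : t = [] := by
      cases t with
      | nil => rfl
      | cons _ _ => simp at h
    subst ht; simp [pvRow, pvColSum]
  | case3 its h mid ih1 ih2 =>
    rw [ih1, ih2, zipWith_add_map]
    refine List.map_congr_left (fun f _ => ?_)
    rw [← colSum_append, List.take_append_drop]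
-- A's nested loop on the three-field dict, characterised by column sums
theorem loopA3 (items : List (List (String × String))) (t x y z : Int) :
    items.foldl (fun st item =>
        (["Reason", "Insertion Point", "Sql Summary"] : List String).foldl (fun st f =>
            (st.1 + PySem.Str.len (pvText item f), pvBump st.2 f (PySem.Str.len (pvText item f)))) st)
      (t, [("Reason", x), ("Insertion Point", y), ("Sql Summary", z)]) =
    (t + pvColSum items "Reason" + pvColSum items "Insertion Point" + pvColSum items "Sql Summary",
     [("Reason", x + pvColSum items "Reason"),
      ("Insertion Point", y + pvColSum items "Insertion Point"),
      ("Sql Summary", z + pvColSum items "Sql Summary")]) := by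
  induction items generalizing t x y z with
  | nil => simp [pvColSum]
  | cons item rest ih =>
    rw [List.foldl_cons]
    have hstep : (["Reason", "Insertion Point", "Sql Summary"] : List String).foldl (fun st f =>
            (st.1 + PySem.Str.len (pvText item f), pvBump st.2 f (PySem.Str.len (pvText item f))))
          ((t, [("Reason", x), ("Insertion Point", y), ("Sql Summary", z)]) :
            Int × List (String × Int)) =
        (t + PySem.Str.len (pvText item "Reason") + PySem.Str.len (pvText item "Insertion Point")
          + PySem.Str.len (pvText item "Sql Summary"),
         [("Reason", x + PySem.Str.len (pvText item "Reason")),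
          ("Insertion Point", y + PySem.Str.len (pvText item "Insertion Point")),
          ("Sql Summary", z + PySem.Str.len (pvText item "Sql Summary"))]) := by
      simp only [List.foldl_cons, List.foldl_nil]
      simp only [pvBump, beq_self_eq_true, if_true,
        show (("Reason" : String) == "Insertion Point") = false from by simp,
        show (("Reason" : String) == "Sql Summary") = false from by simp,
        show (("Insertion Point" : String) == "Sql Summary") = false from by simp,
        Bool.false_eq_true, if_false]
    rw [hstep, ih]
    simp only [colSum_cons, Prod.mk.injEq, List.cons.injEq, and_true, true_and]
    refine ⟨by ring, by ring, by ring, by ring⟩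

-- A's nested loop on the one-field dict
theorem loopA1 (items : List (List (String × String))) (t z : Int) :
    items.foldl (fun st item =>
        (["Sql Summary"] : List String).foldl (fun st f =>
            (st.1 + PySem.Str.len (pvText item f), pvBump st.2 f (PySem.Str.len (pvText item f)))) st)
      (t, [("Sql Summary", z)]) =
    (t + pvColSum items "Sql Summary", [("Sql Summary", z + pvColSum items "Sql Summary")]) := by
  induction items generalizing t z with
  | nil => simp [pvColSum]
  | cons item rest ih =>
    rw [List.foldl_cons]
    have hstep : (["Sql Summary"] : List String).foldl (fun st f =>
            (st.1 + PySem.Str.len (pvText item f), pvBump st.2 f (PySem.Str.len (pvText item f))))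
          ((t, [("Sql Summary", z)]) : Int × List (String × Int)) =
        (t + PySem.Str.len (pvText item "Sql Summary"),
         [("Sql Summary", z + PySem.Str.len (pvText item "Sql Summary"))]) := by
      simp only [List.foldl_cons, List.foldl_nil]
      simp only [pvBump, beq_self_eq_true, if_true]
    rw [hstep, ih]
    simp only [colSum_cons, Prod.mk.injEq, List.cons.injEq, and_true, true_and]
    refine ⟨by ring, by ring⟩

-- ===== VERDICT (by name: the statement is the Claim_ definition above) =====
theorem calculate_llm_metrics_py_spec : Claim_equal_calculate_llm_metrics_py := by
  intro bi mt _
  unfold Spec_calculate_llm_metrics_py calculate_llm_metrics_py calculate_llm_metrics_py_alt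
  by_cases he : bi.isEmpty
  · simp [he]
  · simp only [he, Bool.false_eq_true, if_false]
    rw [colSums_eq]
    unfold pvFields
    by_cases h1 : mt == "atype"
    · simp only [h1, if_true, List.map_cons, List.map_nil]
      rw [loopA3]
      simp
      constructor <;> omega
    · by_cases h2 : mt == "btype"
      · simp only [h1, h2, Bool.false_eq_true, if_true, if_false, List.map_cons, List.map_nil]
        rw [loopA1]
        simp
      · simp [h1, h2]
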